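-- pv_equiv track=rewrite | github.com/s-tefan/aoc2023 | 12/aoc_2023_12.py | greja
-- ===== SOURCE A (Python) =====
-- from math import comb
--
-- def greja(list_of_presumptive_components, b):
--     '''greja räknar felaktigt med när en presumptiv komponent blir fler'''
--     if not list_of_presumptive_components:
--         return 1
--     else:
--         if not b:
--             return 0
--     num = b[0]
--     comp = list_of_presumptive_components[0]
--     n, m = comp.count('?'), comp.count('#')
--     if len(comp) < num or num < m:
--         return greja(list_of_presumptive_components[1:], b)
--     else:
--         return comb(n, num - m) * greja(list_of_presumptive_components[1:], b[1:]) + greja(list_of_presumptive_components[1:], b)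
-- ===== SOURCE B (Python) =====
-- from math import comb
--
-- def greja(list_of_presumptive_components, b):
--     '''Memoized recursion on indices (i, j): no list slicing, each reachable state computed once.'''
--     stats = [(c.count('?'), c.count('#'), len(c)) for c in list_of_presumptive_components]
--     N, M = len(stats), len(b)
--     memo = {}
--
--     def f(i, j):
--         if i == N:
--             return 1
--         if j == M:
--             return 0
--         v = memo.get((i, j))
--         if v is None:
--             n, m, L = stats[i]
--             num = b[j]
--             if L < num or num < m:
--                 v = f(i + 1, j)
--             else:
--                 v = comb(n, num - m) * f(i + 1, j + 1) + f(i + 1, j)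
--             memo[(i, j)] = v
--         return v
--
--     return f(0, 0)
-- ===== Notes on version B (the rewrite author's own statement) =====
-- stated objective: faster
-- what changed: Replaced the exponential branching recursion over list slices with a memoized recursion on indices (i, j): counts are precomputed once per component, no per-call list slicing, and each reachable state is computed once.
import Mathlib
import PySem

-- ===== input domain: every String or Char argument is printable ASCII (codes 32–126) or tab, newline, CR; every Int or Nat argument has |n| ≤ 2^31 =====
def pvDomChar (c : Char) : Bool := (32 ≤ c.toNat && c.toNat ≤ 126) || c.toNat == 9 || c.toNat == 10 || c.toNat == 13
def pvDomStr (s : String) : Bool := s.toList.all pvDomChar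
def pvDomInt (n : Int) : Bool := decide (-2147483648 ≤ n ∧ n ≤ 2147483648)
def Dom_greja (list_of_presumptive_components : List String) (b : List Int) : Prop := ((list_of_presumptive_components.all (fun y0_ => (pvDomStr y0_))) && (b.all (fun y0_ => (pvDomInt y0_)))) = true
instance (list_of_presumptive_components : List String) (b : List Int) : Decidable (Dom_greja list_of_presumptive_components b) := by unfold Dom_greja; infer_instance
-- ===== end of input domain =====

-- B replaces A's slicing branching recursion with a memoized recursion on indices (i, j) (objective: faster).

-- ===== PORT A =====
-- literal transliteration of A's branching recursion; math.comb n k = Nat.choose (k ≥ 0 holds on the taken branch)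
def greja : List String → List Int → Int
  | [], _ => 1
  | _ :: _, [] => 0
  | comp :: rest, num :: brest =>
    let n := PySem.Str.count comp "?"
    let m := PySem.Str.count comp "#"
    if PySem.Str.len comp < num ∨ num < (m : Int) then
      greja rest (num :: brest)
    else
      ((n.choose (num - (m : Int)).toNat : Nat) : Int) * greja rest brest
        + greja rest (num :: brest)

-- ===== PORT B =====
-- Source B's stats: (c.count('?'), c.count('#'), len(c)) per component
def grejaStats (list_of_presumptive_components : List String) : List (Nat × Nat × Int) :=
  list_of_presumptive_components.map
    (fun c => (PySem.Str.count c "?", PySem.Str.count c "#", PySem.Str.len c))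

-- Source B's inner f(i, j) threading the memo dict; the stats suffix stands for i (i == N ↔ suffix empty)
def grejaF (b : List Int) :
    List (Nat × Nat × Int) → Nat → Nat → PySem.Dict (Nat × Nat) Int →
      Int × PySem.Dict (Nat × Nat) Int
  | [], _, _, memo => (1, memo)
  | (n, m, L) :: rest, i, j, memo =>
    if j = b.length then (0, memo)
    else
      match memo.get? (i, j) with
      | some v => (v, memo)
      | none =>
        let num := PySem.List.pyGetD b (j : Int) 0
        if L < num ∨ num < (m : Int) then
          let r := grejaF b rest (i + 1) j memo
          (r.1, r.2.insert (i, j) r.1)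
        else
          let r1 := grejaF b rest (i + 1) (j + 1) memo
          let r2 := grejaF b rest (i + 1) j r1.2
          let v := ((n.choose (num - (m : Int)).toNat : Nat) : Int) * r1.1 + r2.1
          (v, r2.2.insert (i, j) v)

def greja_alt (list_of_presumptive_components : List String) (b : List Int) : Int :=
  (grejaF b (grejaStats list_of_presumptive_components) 0 0 PySem.Dict.empty).1

-- ===== PRECONDITION & SPEC =====
def Spec_greja (list_of_presumptive_components : List String) (b : List Int) (out : Int) : Prop := out = greja_alt list_of_presumptive_components b
instance (list_of_presumptive_components : List String) (b : List Int) (out : Int) : Decidable (Spec_greja list_of_presumptive_components b out) := by unfold Spec_greja; infer_instance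

-- ===== CLAIM (what is proved, stated in full; the proofs are below) =====
def Claim_equal_greja : Prop := ∀ (list_of_presumptive_components : List String) (b : List Int), Dom_greja list_of_presumptive_components b → Spec_greja list_of_presumptive_components b (greja list_of_presumptive_components b)

-- ===== LEMMAS AND PROOFS =====

-- the unmemoized value as a function of (stats suffix, b suffix): the common specification of both ports
def grejaP : List (Nat × Nat × Int) → List Int → Int
  | [], _ => 1
  | _ :: _, [] => 0
  | (n, m, L) :: rest, num :: bs =>
    if L < num ∨ num < (m : Int) then grejaP rest (num :: bs)
    else ((n.choose (num - (m : Int)).toNat : Nat) : Int) * grejaP rest bs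
      + grejaP rest (num :: bs)

theorem greja_eq_grejaP (l : List String) : ∀ b : List Int,
    greja l b = grejaP (grejaStats l) b := by
  induction l with
  | nil => intro b; simp [greja, grejaStats, grejaP]
  | cons c rest ih =>
    intro b
    cases b with
    | nil => simp [greja, grejaStats, grejaP]
    | cons num bs => simp [greja, grejaStats, grejaP, ih]

-- every entry of the memo is the unmemoized value at its key
def GoodMemo (stats : List (Nat × Nat × Int)) (b : List Int)
    (memo : PySem.Dict (Nat × Nat) Int) : Prop :=
  ∀ i j v, memo.get? (i, j) = some v → v = grejaP (stats.drop i) (b.drop j)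

theorem grejaF_spec (stats : List (Nat × Nat × Int)) (b : List Int) :
    ∀ (rest : List (Nat × Nat × Int)) (i j : Nat)
      (memo : PySem.Dict (Nat × Nat) Int),
      rest = stats.drop i → j ≤ b.length → GoodMemo stats b memo →
      (grejaF b rest i j memo).1 = grejaP rest (b.drop j) ∧
        GoodMemo stats b (grejaF b rest i j memo).2 := by
  intro rest
  induction rest with
  | nil =>
    intro i j memo _ _ hg
    exact ⟨by simp [grejaF, grejaP], by simpa [grejaF] using hg⟩
  | cons hd rest' ih =>
    intro i j memo hrest hj hg
    obtain ⟨n, m, L⟩ := hd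
    by_cases hjM : j = b.length
    · constructor
      · simp [grejaF, hjM, List.drop_length, grejaP]
      · simpa [grejaF, hjM] using hg
    · have hjlt : j < b.length := lt_of_le_of_ne hj hjM
      have hdropj : b.drop j = b[j] :: b.drop (j + 1) :=
        List.drop_eq_getElem_cons hjlt
      have hrest' : rest' = stats.drop (i + 1) := by
        rw [← List.tail_drop, ← hrest]
        rfl
      have hnum : PySem.List.pyGetD b (j : Int) 0 = b[j] := by
        rw [PySem.List.pyGetD_natCast]
        simp [List.getD, List.getElem?_eq_getElem hjlt]
      cases hget : memo.get? (i, j) with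
      | some v =>
        constructor
        · have := hg i j v hget
          simp only [grejaF, hjM, if_false, hget]
          rw [this, ← hrest]
        · simpa [grejaF, hjM, hget] using hg
      | none =>
        by_cases hcond : L < b[j] ∨ b[j] < (m : Int)
        · -- skip branch of A's condition
          obtain ⟨hv, hgm⟩ := ih (i + 1) j memo hrest' hj hg
          have hval : (grejaF b ((n, m, L) :: rest') i j memo).1
              = (grejaF b rest' (i + 1) j memo).1 := by
            simp [grejaF, hjM, hget, hnum, hcond]
          have hmem : (grejaF b ((n, m, L) :: rest') i j memo).2
              = (grejaF b rest' (i + 1) j memo).2.insert (i, j)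
                  (grejaF b rest' (i + 1) j memo).1 := by
            simp [grejaF, hjM, hget, hnum, hcond]
          have hvalP : (grejaF b ((n, m, L) :: rest') i j memo).1
              = grejaP ((n, m, L) :: rest') (b.drop j) := by
            rw [hval, hv, hdropj]
            simp only [grejaP]
            rw [if_pos hcond]
          refine ⟨hvalP, ?_⟩
          rw [hmem]
          intro i' j' v' hget'
          rw [PySem.Dict.get?_insert] at hget'
          by_cases hk : (i', j') = (i, j)
          · obtain ⟨hi', hj'⟩ : i' = i ∧ j' = j := by
              simpa [Prod.ext_iff] using hk
            subst hi'; subst hj'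
            rw [if_pos rfl] at hget'
            cases hget'
            rw [← hrest, ← hval]
            exact hvalP
          · rw [if_neg hk] at hget'
            exact hgm i' j' v' hget'
        · -- branching case
          have hj1 : j + 1 ≤ b.length := hjlt
          obtain ⟨hv1, hg1⟩ := ih (i + 1) (j + 1) memo hrest' hj1 hg
          obtain ⟨hv2, hg2⟩ := ih (i + 1) j (grejaF b rest' (i + 1) (j + 1) memo).2 hrest' hj hg1
          have hval : (grejaF b ((n, m, L) :: rest') i j memo).1
              = ((n.choose ((b[j] : Int) - (m : Int)).toNat : Nat) : Int)
                  * (grejaF b rest' (i + 1) (j + 1) memo).1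
                + (grejaF b rest' (i + 1) j (grejaF b rest' (i + 1) (j + 1) memo).2).1 := by
            simp only [grejaF, hget, hnum]
            rw [if_neg hjM, if_neg hcond]
            rfl
          have hmem : (grejaF b ((n, m, L) :: rest') i j memo).2
              = (grejaF b rest' (i + 1) j (grejaF b rest' (i + 1) (j + 1) memo).2).2.insert (i, j)
                  ((grejaF b ((n, m, L) :: rest') i j memo).1) := by
            simp only [grejaF, hget, hnum]
            rw [if_neg hjM, if_neg hcond]
          have hvalP : (grejaF b ((n, m, L) :: rest') i j memo).1
              = grejaP ((n, m, L) :: rest') (b.drop j) := by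
            rw [hval, hv1, hv2, hdropj]
            simp only [grejaP]
            rw [if_neg hcond]
            rfl
          refine ⟨hvalP, ?_⟩
          rw [hmem]
          intro i' j' v' hget'
          rw [PySem.Dict.get?_insert] at hget'
          by_cases hk : (i', j') = (i, j)
          · obtain ⟨hi', hj'⟩ : i' = i ∧ j' = j := by
              simpa [Prod.ext_iff] using hk
            subst hi'; subst hj'
            rw [if_pos rfl] at hget'
            cases hget'
            rw [← hrest]
            exact hvalP
          · rw [if_neg hk] at hget'
            exact hg2 i' j' v' hget'

theorem greja_alt_eq (l : List String) (b : List Int) :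
    greja_alt l b = grejaP (grejaStats l) b := by
  have h := grejaF_spec (grejaStats l) b (grejaStats l) 0 0 PySem.Dict.empty
    (by simp) (Nat.zero_le _) (by intro i j v h; simp [PySem.Dict.get?_empty] at h)
  simpa [greja_alt] using h.1

-- ===== VERDICT (by name: the statement is the Claim_ definition above) =====
theorem greja_spec : Claim_equal_greja := by
  intro l b _
  unfold Spec_greja
  rw [greja_eq_grejaP, greja_alt_eq]
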